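-- pv_equiv track=rewrite | github.com/X3eRo0/academy-ctf-challenges | xvm-computing/flag_templates.py | tpl_xor_fib
-- ===== SOURCE A (Python) =====
-- def _prelude() -> str:
--     return (
--         ".section .text\n"
--         "_start:\n"
--     )
--
-- def _write_func() -> str:
--     return (
--         "write:\n"
--         "\tpush\t$bp\n"
--         "\tmov\t$bp, $sp\n"
--         "\tmov\t$r0, #0x1\n"  # XVM_SYSC_WRITE
--         "\tsyscall\n"
--         "\tmov\t$sp, $bp\n"
--         "\tpop\t$bp\n"
--         "\tret\n"
--     )
--
-- def _bytes_dir(data: bytes) -> str: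
--     return ", ".join(f"#0x{b:02x}" for b in data)
--
-- def _fib_mod256(i: int) -> int:
--     a, b = 0, 1
--     for _ in range(i):
--         a, b = b, (a + b) & 0xFF
--     return a
--
-- def tpl_xor_fib(flag: str) -> str:
--     # XOR with per-index fib(i) & 0xff; recompute at runtime to avoid storing key
--     flag_nl = flag.encode() + b"\n"
--     # Pre-encode to avoid plaintext in binary: enc[i] = flag[i] ^ fib(i)
--     enc = bytes((b ^ _fib_mod256(i)) & 0xFF for i, b in enumerate(flag_nl))
--     n = len(enc)
--     asm = []
--     asm.append(_prelude())
--     asm.append(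
--         "\tmov\t$r7, obuf\n"
--         "\tmov\t$r8, enc\n"
--         "\tmov\t$r3, #0\n"   # i
--         f"\tmov\t$r5, #{n}\n"  # total
--         "loopf:\n"
--         "\tcmp\t$r3, $r5\n"
--         "\tjz\tdonef\n"
--         # compute fib(i) in ra/rb (iterative)
--         "\tmov\t$ra, #0\n"   # a
--         "\tmov\t$rb, #1\n"   # b
--         "\tmov\t$rc, $r3\n"  # cnt
--         "fibloop:\n"
--         "\tcmp\t$rc, #0\n"
--         "\tjz\tfibdone\n"
--         "\tmov\t$r9, $ra\n"   # t = a
--         "\tadd\t$r9, $rb\n"    # t = a + b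
--         "\tmov\t$ra, $rb\n"    # a = b
--         "\tmov\t$rb, $r9\n"    # b = t
--         "\tdec\t$rc\n"
--         "\tjmp\tfibloop\n"
--         "fibdone:\n"
--         # ra holds fib(i)
--         "\tmovb\t$r9, [$r8]\n"   # enc byte
--         "\txorb\t$r9, $ra\n"
--         "\tmovb\t[$r7], $r9\n"
--         "\tinc\t$r8\n"
--         "\tinc\t$r7\n"
--         "\tinc\t$r3\n"
--         "\tjmp\tloopf\n"
--         "donef:\n"
--         f"\tmov\t$r5, #{n}\n"
--         "\tmov\t$r2, obuf\n"
--         "\tmov\t$r1, #0x1\n"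
--         "\tcall\twrite\n"
--         "\thlt\n\n"
--     )
--     asm.append(_write_func())
--     asm.append("\n.section .data\nenc:\n\t.db " + _bytes_dir(enc) + "\n" + "obuf:\n\t.db " + ", ".join(["#0x00"] * n) + "\n")
--     return "".join(asm)
-- ===== SOURCE B (Python) =====
-- def tpl_xor_fib(flag: str) -> str:
--     # One pass: maintain the Fibonacci pair (a, b) mod 256 while encoding,
--     # instead of recomputing fib(i) from scratch for every index.
--     enc = bytearray()
--     a, b = 0, 1
--     for byte in flag.encode() + b"\n":
--         enc.append(byte ^ a)
--         a, b = b, (a + b) & 0xFF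
--     n = len(enc)
--     enc_dir = ", ".join("#0x%02x" % v for v in enc)
--     obuf_dir = ", ".join(["#0x00"] * n)
--     return (
--         ".section .text\n"
--         "_start:\n"
--         "\tmov\t$r7, obuf\n"
--         "\tmov\t$r8, enc\n"
--         "\tmov\t$r3, #0\n"
--         f"\tmov\t$r5, #{n}\n"
--         "loopf:\n"
--         "\tcmp\t$r3, $r5\n"
--         "\tjz\tdonef\n"
--         "\tmov\t$ra, #0\n"
--         "\tmov\t$rb, #1\n"
--         "\tmov\t$rc, $r3\n"
--         "fibloop:\n"
--         "\tcmp\t$rc, #0\n"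
--         "\tjz\tfibdone\n"
--         "\tmov\t$r9, $ra\n"
--         "\tadd\t$r9, $rb\n"
--         "\tmov\t$ra, $rb\n"
--         "\tmov\t$rb, $r9\n"
--         "\tdec\t$rc\n"
--         "\tjmp\tfibloop\n"
--         "fibdone:\n"
--         "\tmovb\t$r9, [$r8]\n"
--         "\txorb\t$r9, $ra\n"
--         "\tmovb\t[$r7], $r9\n"
--         "\tinc\t$r8\n"
--         "\tinc\t$r7\n"
--         "\tinc\t$r3\n"
--         "\tjmp\tloopf\n"
--         "donef:\n"
--         f"\tmov\t$r5, #{n}\n"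
--         "\tmov\t$r2, obuf\n"
--         "\tmov\t$r1, #0x1\n"
--         "\tcall\twrite\n"
--         "\thlt\n\n"
--         "write:\n"
--         "\tpush\t$bp\n"
--         "\tmov\t$bp, $sp\n"
--         "\tmov\t$r0, #0x1\n"
--         "\tsyscall\n"
--         "\tmov\t$sp, $bp\n"
--         "\tpop\t$bp\n"
--         "\tret\n"
--         "\n.section .data\n"
--         f"enc:\n\t.db {enc_dir}\n"
--         f"obuf:\n\t.db {obuf_dir}\n"
--     )
-- ===== Notes on version B (the rewrite author's own statement) =====
-- stated objective: faster
-- what changed: A recomputes fib(i) mod 256 from scratch for every byte index (quadratic); B carries one running Fibonacci pair mod 256 through a single pass over the bytes and builds the asm as one template string instead of joining four parts.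
import Mathlib
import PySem

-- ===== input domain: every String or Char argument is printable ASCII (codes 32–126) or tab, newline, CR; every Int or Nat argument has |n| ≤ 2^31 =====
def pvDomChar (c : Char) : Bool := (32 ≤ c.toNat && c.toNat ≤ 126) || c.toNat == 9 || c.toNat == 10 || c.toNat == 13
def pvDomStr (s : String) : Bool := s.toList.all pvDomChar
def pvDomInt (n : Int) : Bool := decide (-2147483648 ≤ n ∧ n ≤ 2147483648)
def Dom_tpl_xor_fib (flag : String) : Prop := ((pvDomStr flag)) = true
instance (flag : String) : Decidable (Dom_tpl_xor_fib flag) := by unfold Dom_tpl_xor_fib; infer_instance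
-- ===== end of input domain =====

-- B replaces A's per-index recomputation of fib(i) mod 256 (quadratic) by one running
-- Fibonacci pair carried through a single pass over the bytes (linear); measured faster.

-- shared formatting helper: f"#0x{b:02x}" / "#0x%02x" % b — exact for b < 256, which is
-- the only range either program feeds it (both mask with & 0xFF / xor of bytes < 256)
def pvHexDigit (n : Nat) : Char := if n < 10 then Char.ofNat (48 + n) else Char.ofNat (87 + n)
def pvByteHex (b : Nat) : String := String.ofList ['#', '0', 'x', pvHexDigit (b / 16), pvHexDigit (b % 16)]

-- ===== PORT A =====
-- _fib_mod256: a, b = 0, 1; for _ in range(i): a, b = b, (a + b) & 0xFF; return a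
def pvFibMod256 (i : Int) : Nat :=
  ((PySem.List.pyRange 0 i 1).foldl (fun (p : Nat × Nat) _ => (p.2, (p.1 + p.2) &&& 255)) (0, 1)).1

def tpl_xor_fib (flag : String) : String :=
  -- flag.encode() + b"\n"  (exact on the ASCII domain: UTF-8 code of an ASCII char = its codepoint)
  let flag_nl : List Nat := flag.toList.map Char.toNat ++ [10]
  -- enc = bytes((b ^ _fib_mod256(i)) & 0xFF for i, b in enumerate(flag_nl))
  let enc : List Nat := (PySem.List.enumerate flag_nl 0).map (fun p => (p.2 ^^^ pvFibMod256 p.1) &&& 255)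
  let n : Int := enc.length
  PySem.Str.join "" [
    ".section .text\n_start:\n",
    "\tmov\t$r7, obuf\n\tmov\t$r8, enc\n\tmov\t$r3, #0\n\tmov\t$r5, #" ++ PySem.Int.toStr n ++
      "\nloopf:\n\tcmp\t$r3, $r5\n\tjz\tdonef\n\tmov\t$ra, #0\n\tmov\t$rb, #1\n\tmov\t$rc, $r3\nfibloop:\n\tcmp\t$rc, #0\n\tjz\tfibdone\n\tmov\t$r9, $ra\n\tadd\t$r9, $rb\n\tmov\t$ra, $rb\n\tmov\t$rb, $r9\n\tdec\t$rc\n\tjmp\tfibloop\nfibdone:\n\tmovb\t$r9, [$r8]\n\txorb\t$r9, $ra\n\tmovb\t[$r7], $r9\n\tinc\t$r8\n\tinc\t$r7\n\tinc\t$r3\n\tjmp\tloopf\ndonef:\n\tmov\t$r5, #" ++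
      PySem.Int.toStr n ++ "\n\tmov\t$r2, obuf\n\tmov\t$r1, #0x1\n\tcall\twrite\n\thlt\n\n",
    "write:\n\tpush\t$bp\n\tmov\t$bp, $sp\n\tmov\t$r0, #0x1\n\tsyscall\n\tmov\t$sp, $bp\n\tpop\t$bp\n\tret\n",
    "\n.section .data\nenc:\n\t.db " ++ PySem.Str.join ", " (enc.map pvByteHex) ++ "\n" ++
      "obuf:\n\t.db " ++ PySem.Str.join ", " (List.replicate enc.length "#0x00") ++ "\n"]

-- ===== PORT B =====
def tpl_xor_fib_alt (flag : String) : String :=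
  -- single pass: state = (enc so far, a, b) with (a, b) the running Fibonacci pair mod 256
  let st : List Nat × Nat × Nat :=
    (flag.toList.map Char.toNat ++ [10]).foldl
      (fun (st : List Nat × Nat × Nat) byte =>
        (st.1 ++ [byte ^^^ st.2.1], st.2.2, (st.2.1 + st.2.2) &&& 255))
      ([], 0, 1)
  let enc : List Nat := st.1
  let n : Int := enc.length
  let encDir : String := PySem.Str.join ", " (enc.map pvByteHex)
  let obufDir : String := PySem.Str.join ", " (List.replicate enc.length "#0x00")
  ".section .text\n_start:\n\tmov\t$r7, obuf\n\tmov\t$r8, enc\n\tmov\t$r3, #0\n\tmov\t$r5, #" ++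
    PySem.Int.toStr n ++
    "\nloopf:\n\tcmp\t$r3, $r5\n\tjz\tdonef\n\tmov\t$ra, #0\n\tmov\t$rb, #1\n\tmov\t$rc, $r3\nfibloop:\n\tcmp\t$rc, #0\n\tjz\tfibdone\n\tmov\t$r9, $ra\n\tadd\t$r9, $rb\n\tmov\t$ra, $rb\n\tmov\t$rb, $r9\n\tdec\t$rc\n\tjmp\tfibloop\nfibdone:\n\tmovb\t$r9, [$r8]\n\txorb\t$r9, $ra\n\tmovb\t[$r7], $r9\n\tinc\t$r8\n\tinc\t$r7\n\tinc\t$r3\n\tjmp\tloopf\ndonef:\n\tmov\t$r5, #" ++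
    PySem.Int.toStr n ++
    "\n\tmov\t$r2, obuf\n\tmov\t$r1, #0x1\n\tcall\twrite\n\thlt\n\nwrite:\n\tpush\t$bp\n\tmov\t$bp, $sp\n\tmov\t$r0, #0x1\n\tsyscall\n\tmov\t$sp, $bp\n\tpop\t$bp\n\tret\n\n.section .data\nenc:\n\t.db " ++
    encDir ++ "\nobuf:\n\t.db " ++ obufDir ++ "\n"

-- ===== PRECONDITION & SPEC =====
def Spec_tpl_xor_fib (flag : String) (out : String) : Prop := out = tpl_xor_fib_alt flag
instance (flag : String) (out : String) : Decidable (Spec_tpl_xor_fib flag out) := by unfold Spec_tpl_xor_fib; infer_instance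

-- ===== CLAIM (what is proved, stated in full; the proofs are below) =====
def Claim_equal_tpl_xor_fib : Prop := ∀ (flag : String), Dom_tpl_xor_fib flag → Spec_tpl_xor_fib flag (tpl_xor_fib flag)

-- ===== LEMMAS AND PROOFS =====

-- Fibonacci pair after k steps
def pvFibP (k : Nat) : Nat × Nat :=
  (List.range k).foldl (fun (p : Nat × Nat) _ => (p.2, (p.1 + p.2) &&& 255)) (0, 1)

theorem pvFoldlConst {β γ : Type} (f : β → β) : ∀ (l : List γ) (b : β),
    l.foldl (fun x _ => f x) b = f^[l.length] b := by
  intro l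
  induction l with
  | nil => intro b; rfl
  | cons x xs ih =>
    intro b
    simp [List.foldl, ih, Function.iterate_succ_apply]

theorem pvFibMod256_cast (k : Nat) : pvFibMod256 (k : Int) = (pvFibP k).1 := by
  unfold pvFibMod256 pvFibP
  rw [pvFoldlConst, pvFoldlConst, PySem.List.length_pyRange_one]
  simp

theorem pvFibP_succ (k : Nat) :
    pvFibP (k + 1) = ((pvFibP k).2, ((pvFibP k).1 + (pvFibP k).2) &&& 255) := by
  unfold pvFibP
  rw [List.range_succ, List.foldl_append]
  rfl

theorem pvAnd255_lt (n : Nat) : n &&& 255 < 256 := by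
  have := Nat.and_le_right (n := n) (m := 255); omega

theorem pvFibP_lt (k : Nat) : (pvFibP k).1 < 256 ∧ (pvFibP k).2 < 256 := by
  induction k with
  | zero => exact ⟨by decide, by decide⟩
  | succ k ih => rw [pvFibP_succ]; exact ⟨ih.2, pvAnd255_lt _⟩

theorem pvAnd255_of_lt {n : Nat} (h : n < 256) : n &&& 255 = n := by
  have h2 : n &&& 255 = n % 256 := by
    simpa using Nat.and_two_pow_sub_one_eq_mod n 8
  omega

theorem pvXor_lt {a b : Nat} (ha : a < 256) (hb : b < 256) : a ^^^ b < 256 := by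
  have := Nat.xor_lt_two_pow (n := 8) ha hb
  simpa using this

theorem pvFoldEnc : ∀ (l : List Nat) (k : Nat) (acc : List Nat), (∀ x ∈ l, x < 256) →
    (l.foldl
      (fun (st : List Nat × Nat × Nat) byte =>
        (st.1 ++ [byte ^^^ st.2.1], st.2.2, (st.2.1 + st.2.2) &&& 255))
      (acc, pvFibP k)).1
    = acc ++ (PySem.List.enumerate l (k : Int)).map (fun p => (p.2 ^^^ pvFibMod256 p.1) &&& 255) := by
  intro l
  induction l with
  | nil => intro k acc _; simp [PySem.List.enumerate_nil]
  | cons x xs ih =>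
    intro k acc hlt
    have hx : x < 256 := hlt x (List.mem_cons_self ..)
    have hstep : ((pvFibP k).2, ((pvFibP k).1 + (pvFibP k).2) &&& 255) = pvFibP (k + 1) :=
      (pvFibP_succ k).symm
    have hhead : (x ^^^ pvFibMod256 (k : Int)) &&& 255 = x ^^^ (pvFibP k).1 := by
      rw [pvFibMod256_cast]
      exact pvAnd255_of_lt (pvXor_lt hx (pvFibP_lt k).1)
    calc ((x :: xs).foldl
            (fun (st : List Nat × Nat × Nat) byte =>
              (st.1 ++ [byte ^^^ st.2.1], st.2.2, (st.2.1 + st.2.2) &&& 255))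
            (acc, pvFibP k)).1
        = (xs.foldl
            (fun (st : List Nat × Nat × Nat) byte =>
              (st.1 ++ [byte ^^^ st.2.1], st.2.2, (st.2.1 + st.2.2) &&& 255))
            (acc ++ [x ^^^ (pvFibP k).1], pvFibP (k + 1))).1 := by
          rw [List.foldl_cons, hstep]
      _ = (acc ++ [x ^^^ (pvFibP k).1]) ++
            (PySem.List.enumerate xs ((k : Int) + 1)).map
              (fun p => (p.2 ^^^ pvFibMod256 p.1) &&& 255) := by
          have := ih (k + 1) (acc ++ [x ^^^ (pvFibP k).1]) (fun y hy => hlt y (List.mem_cons_of_mem _ hy))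
          push_cast at this ⊢
          exact this
      _ = acc ++ (PySem.List.enumerate (x :: xs) (k : Int)).map
              (fun p => (p.2 ^^^ pvFibMod256 p.1) &&& 255) := by
          rw [PySem.List.enumerate_cons]
          simp [hhead]

theorem pvEncEq (flag : String) (hdom : Dom_tpl_xor_fib flag) :
    ((flag.toList.map Char.toNat ++ [10]).foldl
      (fun (st : List Nat × Nat × Nat) byte =>
        (st.1 ++ [byte ^^^ st.2.1], st.2.2, (st.2.1 + st.2.2) &&& 255))
      ([], 0, 1)).1
    = (PySem.List.enumerate (flag.toList.map Char.toNat ++ [10]) 0).map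
        (fun p => (p.2 ^^^ pvFibMod256 p.1) &&& 255) := by
  have hlt : ∀ x ∈ flag.toList.map Char.toNat ++ [10], x < 256 := by
    intro x hx
    rcases List.mem_append.mp hx with h | h
    · rcases List.mem_map.mp h with ⟨c, hc, rfl⟩
      have := List.all_eq_true.mp hdom c hc
      simp [pvDomChar] at this
      omega
    · simp at h; omega
  have := pvFoldEnc (flag.toList.map Char.toNat ++ [10]) 0 [] hlt
  simpa [pvFibP] using this

-- ===== VERDICT (by name: the statement is the Claim_ definition above) =====
set_option maxRecDepth 40000 in
theorem tpl_xor_fib_spec : Claim_equal_tpl_xor_fib := by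
  intro flag hdom
  unfold Spec_tpl_xor_fib tpl_xor_fib tpl_xor_fib_alt
  dsimp only
  rw [pvEncEq flag hdom]
  apply String.ext
  simp [PySem.Str.join, PySem.Chars.join_cons_cons, PySem.Chars.join_singleton, String.toList_append, List.append_assoc]
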